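-- pv_equiv track=rewrite | github.com/serg13r/PL-Tyagnibidin | 8-lesson.py | count_valid_numbers
-- ===== SOURCE A (Python) =====
-- def count_valid_numbers(N, a, b, c):
--     count = 0
--     valid_digits = {str(a), str(b), str(c)}
--
--     for num in range(100, N + 1):
--         num_str = str(num)
--         # Проверяем, все ли цифры строки содержатся в valid_digits
--         if all(digit in valid_digits for digit in num_str):
--             count += 1
--
--     return count
-- ===== SOURCE B (Python) =====
-- def count_valid_numbers(N, a, b, c):
--     # Digit-DP: count numbers in [1, M] whose decimal digits all lie in the
--     # allowed digit set, in O(log^2 N) instead of scanning the whole range.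
--     allowed = {x for x in (a, b, c) if 0 <= x <= 9}
--     total = len(allowed)
--     lead = sum(1 for d in allowed if d >= 1)
--
--     def is_good(q):
--         while q > 0:
--             if q % 10 not in allowed:
--                 return False
--             q //= 10
--         return True
--
--     def f(M):
--         # number of n in [1, M] all of whose digits are allowed
--         if M <= 0:
--             return 0
--         if M <= 9:
--             return sum(1 for d in allowed if 1 <= d <= M)
--         Q, r = divmod(M, 10)
--         res = lead + total * f(Q - 1)
--         if is_good(Q):
--             res += sum(1 for d in allowed if d <= r)
--         return res
--
--     if N < 100:
--         return 0
--     return f(N) - f(99)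
-- ===== Notes on version B (the rewrite author's own statement) =====
-- stated objective: faster
-- what changed: Replaces the linear scan of every integer in [100,N] (string-testing each) by a digit-DP recursion on the decimal representation of N: f(M) counts allowed-digit numbers in [1,M] via f(M/10 - 1), and the answer is f(N) - f(99).
import Mathlib
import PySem

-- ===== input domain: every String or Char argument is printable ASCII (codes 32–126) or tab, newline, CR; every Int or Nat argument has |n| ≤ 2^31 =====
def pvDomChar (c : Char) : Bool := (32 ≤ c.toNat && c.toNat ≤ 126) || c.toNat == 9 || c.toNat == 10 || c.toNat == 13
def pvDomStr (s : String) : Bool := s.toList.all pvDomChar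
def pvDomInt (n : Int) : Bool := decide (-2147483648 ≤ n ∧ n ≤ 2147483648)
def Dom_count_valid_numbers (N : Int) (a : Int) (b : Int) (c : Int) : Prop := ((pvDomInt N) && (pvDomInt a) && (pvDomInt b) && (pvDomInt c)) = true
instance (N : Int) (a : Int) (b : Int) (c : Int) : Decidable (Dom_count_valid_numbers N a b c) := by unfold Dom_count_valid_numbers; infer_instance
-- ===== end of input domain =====

-- B replaces A's linear scan of [100, N] by a digit-DP recursion on the decimal
-- representation of N (objective: faster, O(log^2 N) arithmetic vs O(N) scanned numbers).

-- ===== PORT A =====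
def count_valid_numbers (N : Int) (a : Int) (b : Int) (c : Int) : Int :=
  let valid_digits : PySem.Set String :=
    PySem.Set.ofList [PySem.Int.toStr a, PySem.Int.toStr b, PySem.Int.toStr c]
  (PySem.List.pyRange 100 (N + 1) 1).foldl
    (fun count num =>
      if (PySem.Int.toChars num).all
          (fun digit => PySem.Set.contains valid_digits (String.ofList [digit]))
      then count + 1 else count) 0

-- ===== PORT B =====
-- termination fact for is_good's while loop (q //= 10 shrinks a positive q)
theorem pvDiv10_toNat_lt (q : Int) (h : 0 < q) :
    (PySem.Int.floordiv q 10).toNat < q.toNat := by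
  rw [PySem.Int.floordiv_eq_ediv_of_pos (by norm_num)]; omega

-- Source B's is_good(q): the while loop testing every decimal digit of q
def pvIsGood (allowed : PySem.Set Int) (q : Int) : Bool :=
  if h : 0 < q then
    if PySem.Set.contains allowed (PySem.Int.mod q 10) then
      pvIsGood allowed (PySem.Int.floordiv q 10)
    else false
  else true
termination_by q.toNat
decreasing_by exact pvDiv10_toNat_lt q h

-- termination fact for f's recursion: (M // 10 - 1).toNat < M.toNat for 10 ≤ M
theorem pvFRec_lt (M : Int) (h0 : ¬ M ≤ 0) (h9 : ¬ M ≤ 9) :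
    (PySem.Int.floordiv M 10 - 1).toNat < M.toNat := by
  rw [PySem.Int.floordiv_eq_ediv_of_pos (by norm_num)]; omega

-- Source B's f(M): count of n in [1, M] all of whose digits are allowed
def pvF (allowed : PySem.Set Int) (total lead : Int) (M : Int) : Int :=
  if h0 : M ≤ 0 then 0
  else if h9 : M ≤ 9 then
    ((allowed.filter (fun d => decide (1 ≤ d) && decide (d ≤ M))).length : Int)
  else
    let Q := PySem.Int.floordiv M 10
    let r := PySem.Int.mod M 10
    let res := lead + total * pvF allowed total lead (Q - 1)
    if pvIsGood allowed Q then
      res + ((allowed.filter (fun d => decide (d ≤ r))).length : Int)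
    else res
termination_by M.toNat
decreasing_by exact pvFRec_lt M h0 h9

def count_valid_numbers_alt (N : Int) (a : Int) (b : Int) (c : Int) : Int :=
  let allowed : PySem.Set Int :=
    PySem.Set.ofList ([a, b, c].filter (fun x => decide (0 ≤ x) && decide (x ≤ 9)))
  let total : Int := PySem.Set.len allowed
  let lead : Int := ((allowed.filter (fun d => decide (1 ≤ d))).length : Int)
  if N < 100 then 0
  else pvF allowed total lead N - pvF allowed total lead 99

-- ===== PRECONDITION & SPEC =====
def Spec_count_valid_numbers (N : Int) (a : Int) (b : Int) (c : Int) (out : Int) : Prop := out = count_valid_numbers_alt N a b c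
instance (N : Int) (a : Int) (b : Int) (c : Int) (out : Int) : Decidable (Spec_count_valid_numbers N a b c out) := by unfold Spec_count_valid_numbers; infer_instance

-- ===== CLAIM (what is proved, stated in full; the proofs are below) =====
def Claim_equal_count_valid_numbers : Prop := ∀ (N : Int) (a : Int) (b : Int) (c : Int), Dom_count_valid_numbers N a b c → Spec_count_valid_numbers N a b c (count_valid_numbers N a b c)

-- ===== LEMMAS AND PROOFS =====

def pvD (n : Nat) : List Char :=
  if n < 10 then [Nat.digitChar n]
  else pvD (n / 10) ++ [Nat.digitChar (n % 10)]
termination_by n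
decreasing_by exact Nat.div_lt_self (by omega) (by norm_num)

def pvGood (ok : Nat → Bool) (n : Nat) : Bool :=
  if n < 10 then ok n
  else ok (n % 10) && pvGood ok (n / 10)
termination_by n
decreasing_by exact Nat.div_lt_self (by omega) (by norm_num)

theorem pvD_ne_nil (n : Nat) : pvD n ≠ [] := by
  rw [pvD]; split <;> simp

theorem pvToDigitsCore_eq (f : Nat) : ∀ (n : Nat) (acc : List Char), n < f →
    Nat.toDigitsCore 10 f n acc = pvD n ++ acc := by
  induction f with
  | zero => omega
  | succ f ih =>
    intro n acc h
    rw [Nat.toDigitsCore]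
    by_cases h10 : n / 10 = 0
    · have hlt : n < 10 := by omega
      simp [h10, pvD, hlt, Nat.mod_eq_of_lt hlt]
    · have hn : 10 ≤ n := by omega
      rw [if_neg h10, ih (n / 10) _ (by omega)]
      conv_rhs => rw [pvD]
      rw [if_neg (by omega)]
      simp

theorem pvToDigits_eq (n : Nat) : Nat.toDigits 10 n = pvD n := by
  have := pvToDigitsCore_eq (n + 1) n [] (by omega)
  simpa [Nat.toDigits] using this

theorem pvAll_pvD (chOK : Char → Bool) (n : Nat) :
    (pvD n).all chOK = pvGood (fun d => chOK (Nat.digitChar d)) n := by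
  induction n using Nat.strong_induction_on with
  | _ n ih =>
    conv_lhs => rw [pvD]
    conv_rhs => rw [pvGood]
    by_cases h : n < 10
    · simp [h]
    · rw [if_neg h, if_neg h, List.all_append]
      rw [ih (n / 10) (Nat.div_lt_self (by omega) (by norm_num))]
      simp [Bool.and_comm]

theorem pvGood_congr (ok₁ ok₂ : Nat → Bool) (h : ∀ d, d < 10 → ok₁ d = ok₂ d) (n : Nat) :
    pvGood ok₁ n = pvGood ok₂ n := by
  induction n using Nat.strong_induction_on with
  | _ n ih =>
    conv_lhs => rw [pvGood]
    conv_rhs => rw [pvGood]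
    by_cases hn : n < 10
    · simp [hn, h n hn]
    · rw [if_neg hn, if_neg hn, h (n % 10) (Nat.mod_lt _ (by norm_num)),
        ih (n / 10) (Nat.div_lt_self (by omega) (by norm_num))]

theorem digitChar_inj : ∀ n < 10, ∀ d < 10, (Nat.digitChar n = Nat.digitChar d ↔ n = d) := by decide

theorem digitChar_ne_dash : ∀ d < 10, Nat.digitChar d ≠ '-' := by decide

theorem pvD_eq_singleton (n d : Nat) (hd : d < 10) : pvD n = [Nat.digitChar d] ↔ n = d := by
  rw [pvD]
  by_cases h : n < 10
  · simp only [if_pos h, List.cons.injEq, and_true]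
    exact digitChar_inj n h d hd
  · rw [if_neg h]
    constructor
    · intro he
      exfalso
      rcases List.append_eq_singleton_iff.mp he with ⟨h1, -⟩ | ⟨-, h2⟩
      · exact pvD_ne_nil _ h1
      · exact absurd h2 (by simp)
    · intro he; omega

theorem pvToStr_eq_digit (x : Int) (d : Nat) (hd : d < 10) :
    (PySem.Int.toStr x = String.ofList [Nat.digitChar d]) ↔ x = (d : Int) := by
  rw [PySem.Int.toStr]
  constructor
  · intro h
    have h2 : PySem.Int.toChars x = [Nat.digitChar d] := by
      have := congrArg String.toList h
      rwa [String.toList_ofList, String.toList_ofList] at this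
    rw [PySem.Int.toChars] at h2
    by_cases hx : x < 0
    · rw [if_pos hx] at h2
      rcases List.cons_eq_cons.mp h2 with ⟨hc, hrest⟩
      exact absurd hc.symm (digitChar_ne_dash d hd)
    · rw [if_neg hx, pvToDigits_eq, pvD_eq_singleton _ d hd] at h2
      omega
  · intro h
    subst h
    congr 1
    rw [PySem.Int.toChars, if_neg (by omega), pvToDigits_eq, pvD]
    simp [hd, Nat.mod_eq_of_lt hd]

theorem pvIsGood_natCast (al : PySem.Set Int) (n : Nat) (hn : 1 ≤ n) :
    pvIsGood al (n : Int) = pvGood (fun d => PySem.Set.contains al (d : Int)) n := by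
  induction n using Nat.strong_induction_on with
  | _ n ih =>
    have hpos : (0 : Int) < (n : Int) := by exact_mod_cast hn
    have hm : PySem.Int.mod (n : Int) 10 = ((n % 10 : Nat) : Int) := by
      have := PySem.Int.mod_natCast n 10; simpa using this
    have hdv : PySem.Int.floordiv (n : Int) 10 = ((n / 10 : Nat) : Int) := by
      have := PySem.Int.floordiv_natCast n 10; simpa using this
    rw [pvIsGood, dif_pos hpos, hm, hdv, pvGood]
    by_cases h : n < 10
    · have h0 : n / 10 = 0 := by omega
      have hmod : n % 10 = n := by omega
      rw [if_pos h, hmod, h0]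
      rw [show ((0 : Nat) : Int) = 0 by simp, pvIsGood]
      cases hc : PySem.Set.contains al (n : Int) <;> simp [hc]
    · rw [if_neg h, ih (n / 10) (Nat.div_lt_self (by omega) (by norm_num)) (by omega)]
      cases hc : PySem.Set.contains al ((n % 10 : Nat) : Int) <;> simp [hc]

theorem pvCountP_le_split (l : List Int) (q : Int → Bool) (r : Int) :
    l.countP (fun d => q d && decide (d ≤ r)) =
      l.countP (fun d => q d && decide (d ≤ r - 1)) + l.countP (fun d => q d && decide (d = r)) := by
  induction l with
  | nil => simp
  | cons x l ih =>
    simp only [List.countP_cons, ih]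
    by_cases hq : q x <;> by_cases h1 : x ≤ r <;> by_cases h2 : x = r <;>
      by_cases h3 : x ≤ r - 1 <;> simp [hq, h1, h2, h3] <;> omega

theorem pvCountP_eq_contains (al : PySem.Set Int) (hnd : al.Nodup) (r : Int) :
    ((al.countP (fun d => decide (d = r)) : Nat) : Int) =
      (if PySem.Set.contains al r then 1 else 0) := by
  induction al with
  | nil => simp [PySem.Set.contains]
  | cons x t ih =>
    have hnd' : t.Nodup := hnd.of_cons
    have hx : x ∉ t := (List.nodup_cons.mp hnd).1
    by_cases hxr : x = r
    · subst hxr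
      have h0 : t.countP (fun d => decide (d = x)) = 0 :=
        List.countP_eq_zero.mpr (by intro y hy; simp; intro he; exact hx (he ▸ hy))
      simp [List.countP_cons, h0, PySem.Set.contains]
    · have ihv := ih hnd'
      have hrx : ¬ (r = x) := fun he => hxr he.symm
      simp only [List.countP_cons, decide_eq_true_eq, hxr, if_false] at ihv ⊢
      simpa [PySem.Set.contains, List.contains_cons, hxr, hrx] using ihv

-- step form of is_good at the Int level
theorem pvIsGood_step (al : PySem.Set Int) (M : Int) (h : 1 ≤ M) :
    pvIsGood al M = (PySem.Set.contains al (M % 10) && pvIsGood al (M / 10)) := by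
  rw [pvIsGood, dif_pos (by omega), PySem.Int.mod_eq_emod_of_pos (by norm_num),
    PySem.Int.floordiv_eq_ediv_of_pos (by norm_num)]
  cases hc : PySem.Set.contains al (M % 10) <;> simp [hc]

theorem pvIsGood_zero (al : PySem.Set Int) : pvIsGood al 0 = true := by
  rw [pvIsGood]; simp

theorem pvF_nonpos (al : PySem.Set Int) (t l M : Int) (h : M ≤ 0) : pvF al t l M = 0 := by
  rw [pvF, dif_pos h]

theorem pvF_small (al : PySem.Set Int) (t l M : Int) (h0 : 1 ≤ M) (h9 : M ≤ 9) :
    pvF al t l M = ((al.filter (fun d => decide (1 ≤ d) && decide (d ≤ M))).length : Int) := by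
  rw [pvF, dif_neg (by omega), dif_pos h9]

theorem pvF_big (al : PySem.Set Int) (t l M : Int) (h : 10 ≤ M) :
    pvF al t l M =
      (if pvIsGood al (M / 10) then
        (l + t * pvF al t l (M / 10 - 1)) +
          ((al.filter (fun d => decide (d ≤ M % 10))).length : Int)
      else l + t * pvF al t l (M / 10 - 1)) := by
  rw [pvF, dif_neg (by omega), dif_neg (by omega)]
  simp only [PySem.Int.floordiv_eq_ediv_of_pos (show (0:Int) < 10 by norm_num),
    PySem.Int.mod_eq_emod_of_pos (show (0:Int) < 10 by norm_num)]

theorem pvF_diff (al : PySem.Set Int) (hnd : al.Nodup) (hmem : ∀ x ∈ al, 0 ≤ x ∧ x ≤ 9)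
    (M : Int) (hM : 1 ≤ M) :
    pvF al (PySem.Set.len al) ((al.filter (fun d => decide (1 ≤ d))).length : Int) M =
      pvF al (PySem.Set.len al) ((al.filter (fun d => decide (1 ≤ d))).length : Int) (M - 1) +
        (if pvIsGood al M then 1 else 0) := by
  set t : Int := PySem.Set.len al with ht
  set lead : Int := ((al.filter (fun d => decide (1 ≤ d))).length : Int) with hlead
  have hsplit : ∀ r : Int, 1 ≤ r →
      ((al.filter (fun d => decide (d ≤ r))).length : Int) =
        ((al.filter (fun d => decide (d ≤ r - 1))).length : Int) +
          (if PySem.Set.contains al r then 1 else 0) := by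
    intro r hr
    have h1 := pvCountP_le_split al (fun _ => true) r
    simp only [Bool.true_and] at h1
    rw [← List.countP_eq_length_filter, ← List.countP_eq_length_filter, h1]
    push_cast
    rw [pvCountP_eq_contains al hnd r]
  have hsplit1 : ∀ r : Int, 1 ≤ r →
      ((al.filter (fun d => decide (1 ≤ d) && decide (d ≤ r))).length : Int) =
        ((al.filter (fun d => decide (1 ≤ d) && decide (d ≤ r - 1))).length : Int) +
          (if PySem.Set.contains al r then 1 else 0) := by
    intro r hr
    have h1 := pvCountP_le_split al (fun d => decide (1 ≤ d)) r
    have h2 : al.countP (fun d => decide (1 ≤ d) && decide (d = r)) =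
        al.countP (fun d => decide (d = r)) := by
      apply List.countP_congr
      intro d hd
      by_cases h : d = r
      · simp [h]; omega
      · simp [h]
    rw [← List.countP_eq_length_filter, ← List.countP_eq_length_filter, h1, h2]
    push_cast
    rw [pvCountP_eq_contains al hnd r]
  have hle0 : ((al.filter (fun d => decide (d ≤ (0:Int)))).length : Int) =
      (if PySem.Set.contains al 0 then 1 else 0) := by
    rw [← List.countP_eq_length_filter]
    have h2 : al.countP (fun d => decide (d ≤ (0:Int))) =
        al.countP (fun d => decide (d = (0:Int))) := by
      apply List.countP_congr
      intro d hd
      have := hmem d hd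
      by_cases h : d = 0 <;> simp [h] <;> omega
    rw [h2]
    exact_mod_cast pvCountP_eq_contains al hnd 0
  have hle9 : ∀ r : Int, 9 ≤ r →
      ((al.filter (fun d => decide (d ≤ r))).length : Int) = t := by
    intro r hr
    rw [ht, PySem.Set.len, ← List.countP_eq_length_filter]
    congr 1
    apply List.countP_eq_length.mpr
    intro d hd
    have := hmem d hd
    simp; omega
  have hlead9 : ∀ r : Int, 9 ≤ r →
      ((al.filter (fun d => decide (1 ≤ d) && decide (d ≤ r))).length : Int) = lead := by
    intro r hr
    rw [hlead, ← List.countP_eq_length_filter, ← List.countP_eq_length_filter]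
    congr 1
    apply List.countP_congr
    intro d hd
    have := hmem d hd
    by_cases h : 1 ≤ d <;> simp [h] <;> omega
  have main : ∀ (k : Nat) (M : Int), M.toNat ≤ k → 1 ≤ M →
      pvF al t lead M = pvF al t lead (M - 1) + (if pvIsGood al M then 1 else 0) := by
    intro k
    induction k with
    | zero => intro M hk hM1; omega
    | succ k ih =>
      intro M hk hM1
      by_cases h9 : M ≤ 9
      · -- 1 ≤ M ≤ 9
        have hgood : pvIsGood al M = PySem.Set.contains al M := by
          rw [pvIsGood_step al M hM1, show M % 10 = M by omega, show M / 10 = 0 by omega,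
            pvIsGood_zero]
          simp
        rw [pvF_small al t lead M hM1 h9, hgood]
        by_cases hM1' : M = 1
        · subst hM1'
          rw [show (1:Int) - 1 = 0 by norm_num, pvF_nonpos al t lead 0 le_rfl]
          rw [hsplit1 1 (by norm_num)]
          have h0 : ((al.filter (fun d => decide (1 ≤ d) && decide (d ≤ (1:Int) - 1))).length : Int) = 0 := by
            rw [← List.countP_eq_length_filter]
            have : al.countP (fun d => decide (1 ≤ d) && decide (d ≤ (1:Int) - 1)) = 0 := by
              apply List.countP_eq_zero.mpr
              intro d hd
              simp; omega
            rw [this]; simp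
          rw [h0]
        · rw [pvF_small al t lead (M - 1) (by omega) (by omega), hsplit1 M hM1]
      · -- M ≥ 10
        rw [pvF_big al t lead M (by omega)]
        by_cases h10 : M = 10
        · subst h10
          rw [show (10:Int) / 10 = 1 by norm_num, show (10:Int) % 10 = 0 by norm_num,
            show (1:Int) - 1 = 0 by norm_num, pvF_nonpos al t lead 0 le_rfl,
            show (10:Int) - 1 = 9 by norm_num,
            pvF_small al t lead 9 (by norm_num) (by norm_num), hlead9 9 (by norm_num)]
          have hg10 : pvIsGood al 10 = (PySem.Set.contains al 0 && pvIsGood al 1) := by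
            rw [pvIsGood_step al 10 (by norm_num)]; norm_num
          have hg1 : pvIsGood al 1 = PySem.Set.contains al 1 := by
            rw [pvIsGood_step al 1 (by norm_num)]
            norm_num [pvIsGood_zero]
          rw [hle0, hg10, hg1]
          cases hc0 : PySem.Set.contains al 0 <;> cases hc1 : PySem.Set.contains al 1 <;>
            simp
        · have hM11 : 11 ≤ M := by omega
          by_cases hr0 : M % 10 = 0
          · -- M ≥ 20, last digit 0
            have hQ2 : 2 ≤ M / 10 := by omega
            rw [pvF_big al t lead (M - 1) (by omega)]
            rw [show (M - 1) / 10 = M / 10 - 1 by omega, show (M - 1) % 10 = 9 by omega, hr0]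
            have hihq := ih (M / 10 - 1) (by omega) (by omega)
            have hgM : pvIsGood al M = (PySem.Set.contains al 0 && pvIsGood al (M / 10)) := by
              rw [pvIsGood_step al M (by omega), hr0]
            rw [hle9 9 (by norm_num), hle0, hihq, hgM]
            cases hcQ : pvIsGood al (M / 10) <;>
              cases hcQ1 : pvIsGood al (M / 10 - 1) <;>
              cases hc0 : PySem.Set.contains al 0 <;> simp <;> ring
          · -- last digit nonzero
            rw [pvF_big al t lead (M - 1) (by omega)]
            rw [show (M - 1) / 10 = M / 10 by omega, show (M - 1) % 10 = M % 10 - 1 by omega]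
            have hgM : pvIsGood al M = (PySem.Set.contains al (M % 10) && pvIsGood al (M / 10)) :=
              pvIsGood_step al M (by omega)
            rw [hsplit (M % 10) (by omega), hgM]
            cases hcQ : pvIsGood al (M / 10) <;>
              cases hcr : PySem.Set.contains al (M % 10) <;> simp <;> ring
  exact main M.toNat M le_rfl hM

theorem pvCheck_eq (a b c : Int) (num : Int) (h : 1 ≤ num) :
    ((PySem.Int.toChars num).all
      (fun digit => PySem.Set.contains
        (PySem.Set.ofList [PySem.Int.toStr a, PySem.Int.toStr b, PySem.Int.toStr c])
        (String.ofList [digit])))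
    = pvIsGood (PySem.Set.ofList ([a, b, c].filter (fun x => decide (0 ≤ x) && decide (x ≤ 9)))) num := by
  have h1 : PySem.Int.toChars num = pvD num.toNat := by
    rw [PySem.Int.toChars, if_neg (by omega), pvToDigits_eq]
  have hok : ∀ d, d < 10 →
      (PySem.Set.contains
        (PySem.Set.ofList [PySem.Int.toStr a, PySem.Int.toStr b, PySem.Int.toStr c])
        (String.ofList [Nat.digitChar d]))
      = PySem.Set.contains (PySem.Set.ofList ([a, b, c].filter (fun x => decide (0 ≤ x) && decide (x ≤ 9)))) (d : Int) := by
    intro d hd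
    rw [Bool.eq_iff_iff, PySem.Set.contains_iff, PySem.Set.contains_iff,
      PySem.Set.mem_ofList, PySem.Set.mem_ofList, List.mem_filter]
    simp only [List.mem_cons, List.not_mem_nil, or_false]
    constructor
    · rintro (h' | h' | h')
      · have := (pvToStr_eq_digit a d hd).mp h'.symm
        refine ⟨Or.inl this.symm, ?_⟩
        simp; omega
      · have := (pvToStr_eq_digit b d hd).mp h'.symm
        refine ⟨Or.inr (Or.inl this.symm), ?_⟩
        simp; omega
      · have := (pvToStr_eq_digit c d hd).mp h'.symm
        refine ⟨Or.inr (Or.inr this.symm), ?_⟩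
        simp; omega
    · rintro ⟨(h' | h' | h'), -⟩
      · exact Or.inl ((pvToStr_eq_digit a d hd).mpr h'.symm).symm
      · exact Or.inr (Or.inl ((pvToStr_eq_digit b d hd).mpr h'.symm).symm)
      · exact Or.inr (Or.inr ((pvToStr_eq_digit c d hd).mpr h'.symm).symm)
  rw [h1, pvAll_pvD, pvGood_congr _ _ hok num.toNat,
    ← pvIsGood_natCast _ num.toNat (by omega), Int.toNat_of_nonneg (by omega)]

theorem count_valid_numbers_spec' (N a b c : Int) :
    count_valid_numbers N a b c = count_valid_numbers_alt N a b c := by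
  unfold count_valid_numbers count_valid_numbers_alt
  set AL : PySem.Set Int :=
    PySem.Set.ofList ([a, b, c].filter (fun x => decide (0 ≤ x) && decide (x ≤ 9))) with hAL
  have hnd : AL.Nodup := PySem.Set.nodup_ofList _
  have hmem : ∀ x ∈ AL, 0 ≤ x ∧ x ≤ 9 := by
    intro x hx
    rw [hAL, PySem.Set.mem_ofList, List.mem_filter] at hx
    have := hx.2
    simp at this
    exact this
  set t : Int := PySem.Set.len AL with ht
  set lead : Int := ((AL.filter (fun d => decide (1 ≤ d))).length : Int) with hlead
  rw [PySem.List.foldl_if_add_one]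
  by_cases hN : N < 100
  · rw [if_pos hN, PySem.List.pyRange_one_eq_nil (by omega)]
    simp
  · rw [if_neg hN]
    have key : ∀ n : Nat,
        (((PySem.List.pyRange 100 ((99 + n) + 1) 1).countP
          (fun num => (PySem.Int.toChars num).all
            (fun digit => PySem.Set.contains
              (PySem.Set.ofList [PySem.Int.toStr a, PySem.Int.toStr b, PySem.Int.toStr c])
              (String.ofList [digit]))) : Nat) : Int)
          = pvF AL t lead (99 + n) - pvF AL t lead 99 := by
      intro n
      induction n with
      | zero =>
        rw [show ((99:Int) + (0:Nat)) + 1 = 100 by norm_num,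
          PySem.List.pyRange_one_eq_nil (by norm_num)]
        norm_num
      | succ n ihn =>
        have hB : ((99:Int) + (n + 1 : Nat)) + 1 = ((99 + n) + 1) + 1 := by push_cast; ring
        rw [hB, PySem.List.pyRange_one_succ_right (by omega), List.countP_append]
        have hnum : (1:Int) ≤ (99 + n) + 1 := by omega
        have hchk := pvCheck_eq a b c ((99 + n) + 1) hnum
        have hdiff := pvF_diff AL hnd hmem ((99 + n) + 1) hnum
        rw [← ht, ← hlead] at hdiff
        have hM1 : ((99:Int) + n) + 1 - 1 = 99 + n := by ring
        rw [hM1] at hdiff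
        have hone : (List.countP
            (fun num => (PySem.Int.toChars num).all
              (fun digit => PySem.Set.contains
                (PySem.Set.ofList [PySem.Int.toStr a, PySem.Int.toStr b, PySem.Int.toStr c])
                (String.ofList [digit]))) [((99:Int) + n) + 1] : Int)
            = (if pvIsGood AL ((99 + n) + 1) then 1 else 0) := by
          rw [List.countP_singleton, hchk, ← hAL]
          by_cases hg : pvIsGood AL ((99 + n) + 1) <;> simp [hg]
        rw [show ((99:Int) + ((n + 1 : Nat) : Int)) = (99 + (n : Int)) + 1 by push_cast; ring]
        push_cast
        push_cast at ihn hone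
        rw [ihn, hone, hdiff]
        ring
    have hn99 : N = 99 + ((N - 99).toNat : Int) := by omega
    rw [zero_add]
    have hkey := key (N - 99).toNat
    rw [← hn99] at hkey
    exact hkey

-- ===== VERDICT (by name: the statement is the Claim_ definition above) =====
theorem count_valid_numbers_spec : Claim_equal_count_valid_numbers := by
  intro N a b c _
  exact count_valid_numbers_spec' N a b c
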